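-- pv_equiv track=rewrite | github.com/KonstantinS343/aois | lab3/table_method.py | build_implicants
-- ===== SOURCE A (Python) =====
-- def build_implicants(data_about_argument, current_element):
--     for x in range(len(current_element)):
--         for k in current_element[x][0].items():
--             if x == 0:
--                 data_about_argument[k[0]] = (True, k[1])
--             elif data_about_argument[k[0]][0]:
--                 data_about_argument[k[0]] = (
--                     bool(True * (not data_about_argument[k[0]][1] != k[1])), k[1])
--     return data_about_argument
-- ===== SOURCE B (Python) =====
-- def build_implicants(data_about_argument, current_element):
--     # Per-key occurrence index: for each key, the ordered list of its values
--     # in elements 1..n-1.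
--     occ = {}
--     for elem, _ in current_element[1:]:
--         for k, v in elem.items():
--             occ.setdefault(k, []).append(v)
--     # Element 0 (re)initialises its keys to (True, value).
--     if current_element:
--         for k, v in current_element[0][0].items():
--             data_about_argument[k] = (True, v)
--     # Per-key pass: a still-True key turns (False, v) at its first value v
--     # differing from the stored one; otherwise the entry is already correct.
--     for k, (flag, val) in list(data_about_argument.items()):
--         if flag:
--             for v in occ.get(k, []):
--                 if v != val:
--                     data_about_argument[k] = (False, v)
--                     break
--     return data_about_argument
-- ===== Notes on version B (the rewrite author's own statement) =====
-- stated objective: alternative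
-- what changed: A rewrites the dict element by element, interleaving all keys; B first builds a per-key index (occurrence lists of each key over elements 1..) plus the element-0 initialisation, then does one independent per-key scan that writes (False, v) at the first value v differing from the stored one.
import Mathlib
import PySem

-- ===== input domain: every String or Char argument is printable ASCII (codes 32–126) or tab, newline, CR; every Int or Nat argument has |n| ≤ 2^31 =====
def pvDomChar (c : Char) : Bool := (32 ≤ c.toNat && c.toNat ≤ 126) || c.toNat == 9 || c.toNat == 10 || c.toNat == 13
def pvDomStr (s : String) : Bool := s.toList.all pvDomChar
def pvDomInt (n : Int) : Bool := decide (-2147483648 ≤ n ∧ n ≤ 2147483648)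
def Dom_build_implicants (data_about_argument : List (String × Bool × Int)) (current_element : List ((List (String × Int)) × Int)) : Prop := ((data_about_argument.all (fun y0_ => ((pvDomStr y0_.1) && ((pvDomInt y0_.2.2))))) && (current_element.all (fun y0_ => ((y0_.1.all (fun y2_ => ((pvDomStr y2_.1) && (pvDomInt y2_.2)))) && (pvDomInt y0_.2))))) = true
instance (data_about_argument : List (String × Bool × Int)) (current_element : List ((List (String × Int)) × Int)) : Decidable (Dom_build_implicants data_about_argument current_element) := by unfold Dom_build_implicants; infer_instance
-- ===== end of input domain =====

-- B replaces A's interleaved element-by-element dict rewriting by a per-key occurrence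
-- index built once, followed by one per-key scan for the first mismatching value
-- (objective: alternative decomposition, same cost). Both A and B mutate and return the
-- same dict object in Python; the equivalence proved here is about the returned value.

-- ===== PORT A =====
def build_implicants (data_about_argument : List (String × Bool × Int)) (current_element : List ((List (String × Int)) × Int)) : List (String × Bool × Int) :=
  -- for x in range(len(current_element)): for k in current_element[x][0].items(): …
  ((PySem.List.enumerate current_element).foldl
    (fun d xe =>
      xe.2.1.foldl
        (fun d k =>
          if xe.1 == 0 then
            d.insert k.1 (true, k.2)
          else
            match d.get? k.1 with
            | some s =>
                if s.1 then d.insert k.1 ((s.2 == k.2), k.2) else d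
            | none => d   -- Python raises KeyError here; excluded by Pre_
        ) d)
    (PySem.Dict.mk data_about_argument)).items

-- ===== PORT B =====
-- for v in occ.get(k, []): if v != val: data[k] = (False, v); break
def pvBScan (d : PySem.Dict String (Bool × Int)) (k : String) (val : Int) : List Int → PySem.Dict String (Bool × Int)
  | [] => d
  | v :: vs => if v ≠ val then d.insert k (false, v) else pvBScan d k val vs

def build_implicants_alt (data_about_argument : List (String × Bool × Int)) (current_element : List ((List (String × Int)) × Int)) : List (String × Bool × Int) :=
  -- occ: per-key ordered list of values in elements 1..
  let occ : PySem.Dict String (List Int) :=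
    (current_element.drop 1).foldl
      (fun o e => e.1.foldl (fun o p => o.modify p.1 [] (fun l => l ++ [p.2])) o)
      PySem.Dict.empty
  -- element 0 (re)initialises its keys to (True, value)
  let d1 : PySem.Dict String (Bool × Int) :=
    match current_element with
    | [] => PySem.Dict.mk data_about_argument
    | e0 :: _ => e0.1.foldl (fun d kv => d.insert kv.1 (true, kv.2)) (PySem.Dict.mk data_about_argument)
  -- per-key pass over a snapshot of the items
  (d1.items.foldl
    (fun d p => if p.2.1 then pvBScan d p.1 p.2.2 (occ.getD p.1 []) else d)
    d1).items

-- ===== PRECONDITION & SPEC =====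
-- Pre_ excludes (a) inputs whose dict arguments contain duplicate keys — such association
-- lists do not represent any Python dict, so A never receives them — and (b) inputs on
-- which Python A raises KeyError: a key of an element at index ≥ 1 that is neither an
-- initial key of data_about_argument nor a key of element 0.
def Pre_build_implicants (data_about_argument : List (String × Bool × Int)) (current_element : List ((List (String × Int)) × Int)) : Prop :=
  (data_about_argument.map (·.1)).Nodup ∧
  ∀ e ∈ current_element.drop 1, ∀ p ∈ e.1,
    p.1 ∈ data_about_argument.map (·.1) ∨ p.1 ∈ (current_element.headD ([], 0)).1.map (·.1)
instance (data_about_argument : List (String × Bool × Int)) (current_element : List ((List (String × Int)) × Int)) : Decidable (Pre_build_implicants data_about_argument current_element) := by unfold Pre_build_implicants; infer_instance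

def pvWitness_build_implicants : (List (String × Bool × Int)) × (List ((List (String × Int)) × Int)) :=
  ([("a", true, 2)], [([("a", 1), ("b", 3)], 0), ([("a", 1)], 1)])

def Spec_build_implicants (data_about_argument : List (String × Bool × Int)) (current_element : List ((List (String × Int)) × Int)) (out : List (String × Bool × Int)) : Prop := out = build_implicants_alt data_about_argument current_element
instance (data_about_argument : List (String × Bool × Int)) (current_element : List ((List (String × Int)) × Int)) (out : List (String × Bool × Int)) : Decidable (Spec_build_implicants data_about_argument current_element out) := by unfold Spec_build_implicants; infer_instance

-- ===== CLAIM (what is proved, stated in full; the proofs are below) =====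
def Claim_equal_build_implicants : Prop := ∀ (data_about_argument : List (String × Bool × Int)) (current_element : List ((List (String × Int)) × Int)), Dom_build_implicants data_about_argument current_element → Pre_build_implicants data_about_argument current_element → Spec_build_implicants data_about_argument current_element (build_implicants data_about_argument current_element)


-- ===== LEMMAS AND PROOFS =====

-- per-key pure model of A's update
def pvStep (s : Bool × Int) (v : Int) : Bool × Int := if s.1 then ((s.2 == v), v) else s
def pvChain (s : Bool × Int) (L : List Int) : Bool × Int := L.foldl pvStep s
def pvVals (es : List ((List (String × Int)) × Int)) (k : String) : List Int :=
  es.flatMap (fun e => (e.1.filter (fun p => p.1 == k)).map (·.2))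
def pvStepA (d : PySem.Dict String (Bool × Int)) (p : String × Int) : PySem.Dict String (Bool × Int) :=
  match d.get? p.1 with
  | some s => if s.1 then d.insert p.1 ((s.2 == p.2), p.2) else d
  | none => d
def pvUpdB (occ : PySem.Dict String (List Int)) (d : PySem.Dict String (Bool × Int))
    (p : String × (Bool × Int)) : PySem.Dict String (Bool × Int) :=
  if p.2.1 then pvBScan d p.1 p.2.2 (occ.getD p.1 []) else d

theorem pvChain_false (x : Int) (L : List Int) : pvChain (false, x) L = (false, x) := by
  induction L with
  | nil => rfl
  | cons v vs ih => simpa [pvChain, pvStep] using ih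

theorem pvChain_append (s : Bool × Int) (L1 L2 : List Int) :
    pvChain s (L1 ++ L2) = pvChain (pvChain s L1) L2 := List.foldl_append

theorem pvStepA_get_ne (d : PySem.Dict String (Bool × Int)) (p : String × Int) (k : String)
    (h : k ≠ p.1) : (pvStepA d p).get? k = d.get? k := by
  unfold pvStepA
  cases hd : d.get? p.1 with
  | none => rfl
  | some s =>
    dsimp only
    split
    · exact PySem.Dict.get?_insert_of_ne _ _ h
    · rfl

theorem pvStepA_get_self (d : PySem.Dict String (Bool × Int)) (p : String × Int)
    (s : Bool × Int) (h : d.get? p.1 = some s) :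
    (pvStepA d p).get? p.1 = some (pvStep s p.2) := by
  simp only [pvStepA, pvStep, h]
  split_ifs
  · rw [PySem.Dict.get?_insert_self]
  · exact h

theorem pvStepA_keys (d : PySem.Dict String (Bool × Int)) (p : String × Int) :
    (pvStepA d p).keys = d.keys := by
  unfold pvStepA
  cases hd : d.get? p.1 with
  | none => rfl
  | some s =>
    dsimp only
    split
    · exact PySem.Dict.keys_insert_of_contains _ _
        (by rw [PySem.Dict.contains_eq_isSome_get?, hd]; rfl)
    · rfl

theorem pvA1 (l : List (String × Int)) : ∀ (d : PySem.Dict String (Bool × Int)) (k : String),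
    (l.foldl pvStepA d).get? k =
      (d.get? k).map (fun s => pvChain s ((l.filter (fun p => p.1 == k)).map (·.2))) := by
  induction l with
  | nil => intro d k; rw [List.foldl_nil]; cases d.get? k <;> rfl
  | cons p rest ih =>
    intro d k
    rw [List.foldl_cons, ih]
    by_cases hk : k = p.1
    · have hfilter : List.filter (fun q => q.1 == k) (p :: rest)
          = p :: List.filter (fun q => q.1 == k) rest := by
        rw [List.filter_cons_of_pos (by simp [hk])]
      rw [hfilter]
      cases hd : d.get? p.1 with
      | none =>
        have hA : pvStepA d p = d := by unfold pvStepA; rw [hd]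
        rw [hA, hk, hd]; rfl
      | some s =>
        rw [hk, pvStepA_get_self d p s hd, hd]
        simp [pvChain]
    · have hp1 : (p.1 == k) = false := by
        simpa using fun he => hk he.symm
      rw [pvStepA_get_ne d p k hk, List.filter_cons_of_neg (by simp [hp1])]

theorem pvA2 (es : List ((List (String × Int)) × Int)) :
    ∀ (d : PySem.Dict String (Bool × Int)) (k : String),
    (es.foldl (fun d e => e.1.foldl pvStepA d) d).get? k =
      (d.get? k).map (fun s => pvChain s (pvVals es k)) := by
  induction es with
  | nil => intro d k; rw [List.foldl_nil]; cases d.get? k <;> rfl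
  | cons e rest ih =>
    intro d k
    rw [List.foldl_cons, ih, pvA1]
    cases d.get? k with
    | none => rfl
    | some s => simp [pvVals, List.flatMap_cons, pvChain_append]

theorem pvAinner_keys (l : List (String × Int)) :
    ∀ d : PySem.Dict String (Bool × Int), (l.foldl pvStepA d).keys = d.keys := by
  induction l with
  | nil => intro d; rfl
  | cons p rest ih => intro d; rw [List.foldl_cons, ih, pvStepA_keys]

theorem pvA_keys (es : List ((List (String × Int)) × Int)) :
    ∀ d : PySem.Dict String (Bool × Int),
    (es.foldl (fun d e => e.1.foldl pvStepA d) d).keys = d.keys := by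
  induction es with
  | nil => intro d; rfl
  | cons e rest ih => intro d; rw [List.foldl_cons, ih, pvAinner_keys]

theorem pvBScan_get_ne (L : List Int) (d : PySem.Dict String (Bool × Int)) (k : String)
    (val : Int) (k' : String) (h : k' ≠ k) : (pvBScan d k val L).get? k' = d.get? k' := by
  induction L with
  | nil => rfl
  | cons v vs ih =>
    unfold pvBScan
    split
    · exact PySem.Dict.get?_insert_of_ne _ _ h
    · exact ih

theorem pvBScan_get_self (L : List Int) (d : PySem.Dict String (Bool × Int)) (k : String)
    (val : Int) (h : d.get? k = some (true, val)) :
    (pvBScan d k val L).get? k = some (pvChain (true, val) L) := by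
  induction L with
  | nil => exact h
  | cons v vs ih =>
    unfold pvBScan
    split
    · next hne =>
      rw [PySem.Dict.get?_insert_self]
      have hstep : pvStep (true, val) v = (false, v) := by simp [pvStep, Ne.symm hne]
      have hch : pvChain (true, val) (v :: vs) = (false, v) := by
        rw [pvChain, List.foldl_cons, hstep]
        exact pvChain_false v vs
      rw [hch]
    · next heq =>
      have hv : v = val := not_ne_iff.mp heq
      have hch : pvChain (true, val) (v :: vs) = pvChain (true, val) vs := by
        rw [pvChain, List.foldl_cons, hv]
        simp [pvStep, pvChain]
      rw [hch]
      exact ih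

theorem pvBScan_keys (L : List Int) (d : PySem.Dict String (Bool × Int)) (k : String)
    (val : Int) (h : d.contains k = true) : (pvBScan d k val L).keys = d.keys := by
  induction L with
  | nil => rfl
  | cons v vs ih =>
    unfold pvBScan
    split
    · exact PySem.Dict.keys_insert_of_contains _ _ h
    · exact ih

theorem pvUpdB_get_ne (occ : PySem.Dict String (List Int)) (d : PySem.Dict String (Bool × Int))
    (p : String × (Bool × Int)) (k : String) (h : k ≠ p.1) :
    (pvUpdB occ d p).get? k = d.get? k := by
  unfold pvUpdB
  split
  · exact pvBScan_get_ne _ _ _ _ _ h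
  · rfl

theorem pvUpdB_get_self (occ : PySem.Dict String (List Int)) (d : PySem.Dict String (Bool × Int))
    (p : String × (Bool × Int)) (h : d.get? p.1 = some p.2) :
    (pvUpdB occ d p).get? p.1 = some (pvChain p.2 (occ.getD p.1 [])) := by
  obtain ⟨k0, f, v⟩ := p
  cases f with
  | true =>
    unfold pvUpdB
    rw [if_pos rfl]
    exact pvBScan_get_self _ _ _ _ h
  | false =>
    unfold pvUpdB
    rw [if_neg (by simp)]
    rw [pvChain_false]
    exact h

theorem pvUpdB_keys (occ : PySem.Dict String (List Int)) (d : PySem.Dict String (Bool × Int))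
    (p : String × (Bool × Int)) (h : d.contains p.1 = true) :
    (pvUpdB occ d p).keys = d.keys := by
  unfold pvUpdB
  split
  · exact pvBScan_keys _ _ _ _ h
  · rfl

theorem pvFind_nodup {α : Type} (l : List (String × α)) (k : String) (s : α)
    (hnd : (l.map (·.1)).Nodup) (hm : (k, s) ∈ l) :
    l.find? (fun p => p.1 == k) = some (k, s) := by
  induction l with
  | nil => cases hm
  | cons q rest ih =>
    rcases List.mem_cons.mp hm with h | h
    · subst h
      simp [List.find?]
    · have hk : k ∈ rest.map (·.1) := List.mem_map.mpr ⟨(k, s), h, rfl⟩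
      have hq : ¬((fun (p : String × α) => p.1 == k) q = true) := by
        simp only [beq_iff_eq]
        intro he
        exact (List.nodup_cons.mp hnd).1 (by simpa [he] using hk)
      rw [List.find?_cons_of_neg (p := fun (p : String × α) => p.1 == k) (a := q) (l := rest) hq]
      exact ih (List.nodup_cons.mp hnd).2 h

theorem pvFind_not_mem {α : Type} (l : List (String × α)) (k : String)
    (h : k ∉ l.map (·.1)) : l.find? (fun p => p.1 == k) = none := by
  rw [List.find?_eq_none]
  intro p hp
  simp only [beq_iff_eq]
  intro he
  exact h (List.mem_map.mpr ⟨p, hp, he⟩)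

theorem pvBFold (occ : PySem.Dict String (List Int)) :
    ∀ (l : List (String × (Bool × Int))) (d : PySem.Dict String (Bool × Int)),
    (l.map (·.1)).Nodup → (∀ p ∈ l, d.get? p.1 = some p.2) → ∀ k : String,
    (l.foldl (pvUpdB occ) d).get? k =
      match l.find? (fun p => p.1 == k) with
      | some p => some (pvChain p.2 (occ.getD k []))
      | none => d.get? k := by
  intro l
  induction l with
  | nil => intro d _ _ k; rfl
  | cons p rest ih =>
    intro d hnd hmem k
    have hdp : d.get? p.1 = some p.2 := hmem p (List.mem_cons_self ..)
    have hp1 : p.1 ∉ rest.map (·.1) := (List.nodup_cons.mp hnd).1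
    have hmem2 : ∀ q ∈ rest, (pvUpdB occ d p).get? q.1 = some q.2 := by
      intro q hq
      rw [pvUpdB_get_ne]
      · exact hmem q (List.mem_cons_of_mem _ hq)
      · intro he
        exact hp1 (by rw [← he]; exact List.mem_map.mpr ⟨q, hq, rfl⟩)
    rw [List.foldl_cons, ih (pvUpdB occ d p) (List.nodup_cons.mp hnd).2 hmem2 k]
    by_cases hk : p.1 = k
    · subst hk
      rw [pvFind_not_mem rest p.1 hp1, List.find?_cons_of_pos (by simp)]
      exact pvUpdB_get_self occ d p hdp
    · rw [List.find?_cons_of_neg (by simp [hk])]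
      cases rest.find? (fun q => q.1 == k) with
      | some q => rfl
      | none => exact pvUpdB_get_ne occ d p k (fun he => hk he.symm)

theorem pvBFold_keys (occ : PySem.Dict String (List Int)) :
    ∀ (l : List (String × (Bool × Int))) (d : PySem.Dict String (Bool × Int)),
    (∀ p ∈ l, d.contains p.1 = true) →
    (l.foldl (pvUpdB occ) d).keys = d.keys := by
  intro l
  induction l with
  | nil => intro d _; rfl
  | cons p rest ih =>
    intro d h
    have hk := pvUpdB_keys occ d p (h p (List.mem_cons_self ..))
    have h2 : ∀ q ∈ rest, (pvUpdB occ d p).contains q.1 = true := by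
      intro q hq
      rw [PySem.Dict.contains_eq_decide_mem_keys, hk, ← PySem.Dict.contains_eq_decide_mem_keys]
      exact h q (List.mem_cons_of_mem _ hq)
    rw [List.foldl_cons, ih (pvUpdB occ d p) h2, hk]

theorem pvOcc_getD (es : List ((List (String × Int)) × Int)) :
    ∀ (o : PySem.Dict String (List Int)) (k : String),
    (es.foldl (fun o e => e.1.foldl (fun o p => o.modify p.1 [] (fun l => l ++ [p.2])) o) o).getD k []
      = o.getD k [] ++ pvVals es k := by
  induction es with
  | nil => intro o k; simp [pvVals]
  | cons e rest ih =>
    intro o k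
    rw [List.foldl_cons, ih, PySem.Dict.getD_foldl_modify_append]
    simp [pvVals, List.flatMap_cons]

theorem pvMain (es : List ((List (String × Int)) × Int)) (d1 : PySem.Dict String (Bool × Int))
    (occE : PySem.Dict String (List Int)) (hnd1 : d1.keys.Nodup)
    (hocc : ∀ k, occE.getD k [] = pvVals es k) :
    (es.foldl (fun d e => e.1.foldl pvStepA d) d1).items
      = (d1.items.foldl (pvUpdB occE) d1).items := by
  have hndl : (d1.items.map (·.1)).Nodup := hnd1
  have hmemitems : ∀ p ∈ d1.items, d1.get? p.1 = some p.2 := by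
    intro p hp
    exact PySem.Dict.get?_of_mem_items d1 hp hnd1
  have hcontains : ∀ p ∈ d1.items, d1.contains p.1 = true := by
    intro p hp
    rw [PySem.Dict.contains_eq_isSome_get?, hmemitems p hp]
    rfl
  have hget : ∀ k, (es.foldl (fun d e => e.1.foldl pvStepA d) d1).get? k
      = (d1.items.foldl (pvUpdB occE) d1).get? k := by
    intro k
    rw [pvA2, pvBFold occE d1.items d1 hndl hmemitems k]
    cases hd : d1.get? k with
    | none =>
      have hnk : k ∉ d1.items.map (·.1) :=
        (PySem.Dict.get?_eq_none_iff_not_mem_keys d1 k).mp hd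
      rw [pvFind_not_mem d1.items k hnk]
      rfl
    | some s =>
      have hm : (k, s) ∈ d1.items := PySem.Dict.mem_items_of_get?_eq_some d1 hd
      rw [pvFind_nodup d1.items k s hndl hm, hocc k]
      rfl
  have hkA : (es.foldl (fun d e => e.1.foldl pvStepA d) d1).keys = d1.keys := pvA_keys es d1
  have hkB : (d1.items.foldl (pvUpdB occE) d1).keys = d1.keys :=
    pvBFold_keys occE d1.items d1 hcontains
  rw [PySem.Dict.items_eq_map_keys _ (by rw [hkA]; exact hnd1) (false, 0),
      PySem.Dict.items_eq_map_keys _ (by rw [hkB]; exact hnd1) (false, 0), hkA, hkB]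
  apply List.map_congr_left
  intro k _
  rw [PySem.Dict.getD_eq_get?_getD, PySem.Dict.getD_eq_get?_getD, hget k]

-- ===== VERDICT (by name: the statement is the Claim_ definition above) =====
theorem build_implicants_spec : Claim_equal_build_implicants := by
  intro data ce _hdom hpre
  unfold Spec_build_implicants
  obtain ⟨hnodup, -⟩ := hpre
  cases ce with
  | nil =>
    have hnd1 : (PySem.Dict.mk data).keys.Nodup := by
      rw [PySem.Dict.keys_mk]; exact hnodup
    exact pvMain [] (PySem.Dict.mk data) PySem.Dict.empty hnd1
      (fun k => by rw [PySem.Dict.getD_empty]; rfl)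
  | cons e0 rest =>
    have hnd1 : (e0.1.foldl (fun d k => d.insert k.1 ((true : Bool), k.2)) (PySem.Dict.mk data)).keys.Nodup :=
      PySem.Dict.nodup_keys_foldl_insert_key e0.1 (fun kv => kv.1) (fun _ kv => (true, kv.2))
        (PySem.Dict.mk data) (by rw [PySem.Dict.keys_mk]; exact hnodup)
    have hocc : ∀ k, ((rest.foldl
        (fun o e => e.1.foldl (fun o p => o.modify p.1 [] (fun l => l ++ [p.2])) o)
        PySem.Dict.empty : PySem.Dict String (List Int))).getD k [] = pvVals rest k := by
      intro k
      rw [pvOcc_getD rest PySem.Dict.empty k, PySem.Dict.getD_empty, List.nil_append]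
    unfold build_implicants
    show ((PySem.List.enumerate (e0 :: rest) 0).foldl
        (fun d xe => xe.2.1.foldl
          (fun d k => if xe.1 == 0 then d.insert k.1 (true, k.2) else pvStepA d k) d)
        (PySem.Dict.mk data)).items = _
    rw [PySem.List.enumerate_cons, List.foldl_cons]
    show ((PySem.List.enumerate rest 1).foldl
        (fun d xe => xe.2.1.foldl
          (fun d k => if xe.1 == 0 then d.insert k.1 (true, k.2) else pvStepA d k) d)
        (e0.1.foldl (fun d k => d.insert k.1 (true, k.2)) (PySem.Dict.mk data))).items = _
    have hcong : ∀ xe ∈ PySem.List.enumerate rest 1, ∀ acc : PySem.Dict String (Bool × Int),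
        xe.2.1.foldl (fun d k => if xe.1 == 0 then d.insert k.1 ((true : Bool), k.2) else pvStepA d k) acc
          = xe.2.1.foldl pvStepA acc := by
      intro xe hxe acc
      have hne : xe.1 ≠ 0 := by
        rcases (PySem.List.mem_enumerate_iff rest 1 xe).mp hxe with ⟨j, hj, rfl⟩
        simp only [ne_eq]
        omega
      apply PySem.List.foldl_congr_mem'
      intro kv _ acc2
      rw [if_neg (by simp [hne])]
    rw [PySem.List.foldl_congr_mem' (PySem.List.enumerate rest 1) _ _ _ hcong]
    rw [show (PySem.List.enumerate rest 1).foldl (fun acc xe => xe.2.1.foldl pvStepA acc)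
          (e0.1.foldl (fun d k => d.insert k.1 ((true : Bool), k.2)) (PySem.Dict.mk data))
        = rest.foldl (fun d e => e.1.foldl pvStepA d)
          (e0.1.foldl (fun d k => d.insert k.1 ((true : Bool), k.2)) (PySem.Dict.mk data)) from by
      conv_rhs => rw [← PySem.List.map_snd_enumerate rest 1]
      rw [List.foldl_map]]
    exact pvMain rest _ _ hnd1 hocc
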